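-- pv_equiv track=rewrite | github.com/bgiesa/pythonNodeFun | main.py | getNodesDict
-- ===== SOURCE A (Python) =====
-- def getNodesDict(dificult):
--     nodeDict =  { 'cpu':1, 'storage':2, 'io': 3, 'node':5}
--     for i in range(0, dificult):
--         if (i % 5) == 0:
--             nodeDict['cpu'] += 1
--         if(i % 2) == 0:
--             nodeDict['storage'] += 1
--         nodeDict['node'] += 1
--
--     return nodeDict
-- ===== SOURCE B (Python) =====
-- def getNodesDict(dificult):
--     # Closed-form counts via ceiling division instead of iterating the range.
--     n = max(dificult, 0)
--     return {'cpu': 1 + (n + 4) // 5, 'storage': 2 + (n + 1) // 2, 'io': 3, 'node': 5 + n}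
-- ===== Notes on version B (the rewrite author's own statement) =====
-- stated objective: faster
-- what changed: Replaces the O(n) per-element counting loop with closed-form ceiling-division formulas for how many loop indices hit each modulus.
import Mathlib
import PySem

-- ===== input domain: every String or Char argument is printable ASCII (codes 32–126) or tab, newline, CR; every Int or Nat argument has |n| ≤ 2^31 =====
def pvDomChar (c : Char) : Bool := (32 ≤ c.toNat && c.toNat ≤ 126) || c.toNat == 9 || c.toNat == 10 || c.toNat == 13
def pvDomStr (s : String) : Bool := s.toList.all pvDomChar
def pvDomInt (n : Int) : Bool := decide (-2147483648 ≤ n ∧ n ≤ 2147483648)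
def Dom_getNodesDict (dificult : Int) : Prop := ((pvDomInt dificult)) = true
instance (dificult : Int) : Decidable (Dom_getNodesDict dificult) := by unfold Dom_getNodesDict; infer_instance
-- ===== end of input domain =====

-- ===== PORT A =====
-- B changes: closed-form integer-division counts replace A's O(n) loop (objective: faster).
def getNodesDict (dificult : Int) : List (String × Int) :=
  let nodeDict : PySem.Dict String Int :=
    PySem.Dict.ofList [("cpu", 1), ("storage", 2), ("io", 3), ("node", 5)]
  ((PySem.List.pyRange 0 dificult 1).foldl
    (fun d i =>
      let d := if PySem.Int.mod i 5 == 0 then PySem.Dict.modify d "cpu" 0 (· + 1) else d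
      let d := if PySem.Int.mod i 2 == 0 then PySem.Dict.modify d "storage" 0 (· + 1) else d
      PySem.Dict.modify d "node" 0 (· + 1))
    nodeDict).items

-- ===== PORT B =====
def getNodesDict_alt (dificult : Int) : List (String × Int) :=
  let n := max dificult 0
  [("cpu", 1 + PySem.Int.floordiv (n + 4) 5),
   ("storage", 2 + PySem.Int.floordiv (n + 1) 2),
   ("io", 3),
   ("node", 5 + n)]

-- ===== PRECONDITION & SPEC =====
def Spec_getNodesDict (dificult : Int) (out : List (String × Int)) : Prop := out = getNodesDict_alt dificult
instance (dificult : Int) (out : List (String × Int)) : Decidable (Spec_getNodesDict dificult out) := by unfold Spec_getNodesDict; infer_instance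

-- ===== CLAIM (what is proved, stated in full; the proofs are below) =====
def Claim_equal_getNodesDict : Prop := ∀ (dificult : Int), Dom_getNodesDict dificult → Spec_getNodesDict dificult (getNodesDict dificult)

-- ===== LEMMAS AND PROOFS =====
lemma getNodesDict_fold_closed (n : Nat) :
    (PySem.List.pyRange 0 (n : Int) 1).foldl
      (fun d i =>
        let d := if PySem.Int.mod i 5 == 0 then PySem.Dict.modify d "cpu" 0 (· + 1) else d
        let d := if PySem.Int.mod i 2 == 0 then PySem.Dict.modify d "storage" 0 (· + 1) else d
        PySem.Dict.modify d "node" 0 (· + 1))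
      (PySem.Dict.ofList [("cpu", 1), ("storage", 2), ("io", 3), ("node", 5)])
    = PySem.Dict.mk
        [("cpu", (1 : Int) + (((n + 4) / 5 : Nat) : Int)),
         ("storage", (2 : Int) + (((n + 1) / 2 : Nat) : Int)),
         ("io", 3),
         ("node", (5 : Int) + n)] := by
  induction n with
  | zero => decide
  | succ m ih =>
      have hstep : PySem.List.pyRange 0 ((m : Int) + 1) 1
          = PySem.List.pyRange 0 (m : Int) 1 ++ [(m : Int)] :=
        PySem.List.pyRange_one_succ_right (by positivity)
      push_cast
      rw [hstep, List.foldl_append, ih]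
      simp only [List.foldl_cons, List.foldl_nil]
      by_cases h5 : (5 : Int) ∣ (m : Int) <;> by_cases h2 : (2 : Int) ∣ (m : Int) <;>
        simp [h5, h2, PySem.Dict.modify, PySem.Dict.insert, PySem.Dict.contains,
          PySem.Dict.getD, PySem.Dict.get?, List.find?, List.any, Option.map, Option.getD,
          PySem.Dict.mk.injEq, List.cons.injEq, Prod.mk.injEq] <;>
        (repeat' apply And.intro) <;>
        first
          | omega
          | (clear h2; omega)

-- ===== VERDICT (by name: the statement is the Claim_ definition above) =====
theorem getNodesDict_spec : Claim_equal_getNodesDict := by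
  intro dificult _
  unfold Spec_getNodesDict getNodesDict getNodesDict_alt
  dsimp only
  by_cases h : dificult ≤ 0
  · rw [PySem.List.pyRange_one_eq_nil h, max_eq_right h]
    simp only [List.foldl_nil]
    rw [PySem.Int.floordiv_eq_ediv_of_pos (by norm_num),
        PySem.Int.floordiv_eq_ediv_of_pos (by norm_num)]
    decide
  · replace h : 0 < dificult := lt_of_not_ge h
    have ht : ((dificult.toNat : Int)) = dificult := Int.toNat_of_nonneg h.le
    rw [← ht, getNodesDict_fold_closed, max_eq_left (by positivity)]
    rw [PySem.Int.floordiv_eq_ediv_of_pos (by norm_num),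
        PySem.Int.floordiv_eq_ediv_of_pos (by norm_num)]
    refine List.cons_eq_cons.mpr ⟨?_, List.cons_eq_cons.mpr ⟨?_, rfl⟩⟩ <;>
      · refine congrArg _ (congrArg _ ?_); omega
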